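-- pv_equiv track=rewrite | github.com/yacinemassena/Lecrillon | download_data.py | _matches_year_filter
-- ===== SOURCE A (Python) =====
-- from typing import Optional
--
-- def _matches_year_filter(relative_path: str,
--                          year: Optional[int] = None,
--                          start_year: Optional[int] = None,
--                          end_year: Optional[int] = None) -> bool:
--     """Best-effort year filter for mixed dataset trees.
--
--     Supports filenames like YYYY-MM-DD.parquet, YYYY_embedded.parquet,
--     and directory layouts containing a 4-digit year component.
--     Files without a detectable year are kept.
--     """
--     if not year and not (start_year and end_year):
--         return True
--
--     parts = [p for p in relative_path.replace('\\', '/').split('/') if p]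
--     filename = parts[-1] if parts else relative_path
--     candidate_year = None
--
--     for part in reversed(parts[:-1]):
--         if len(part) == 4 and part.isdigit():
--             candidate_year = int(part)
--             break
--
--     if candidate_year is None:
--         prefix = filename.split('-')[0]
--         if len(prefix) == 4 and prefix.isdigit():
--             candidate_year = int(prefix)
--         else:
--             prefix = filename.split('_')[0]
--             if len(prefix) == 4 and prefix.isdigit():
--                 candidate_year = int(prefix)
--
--     if candidate_year is None:
--         return True
--
--     if year:
--         return candidate_year == year
--     return start_year <= candidate_year <= end_year
-- ===== SOURCE B (Python) =====
-- from typing import Optional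
--
--
-- def _matches_year_filter(relative_path: str,
--                          year: Optional[int] = None,
--                          start_year: Optional[int] = None,
--                          end_year: Optional[int] = None) -> bool:
--     """Index-based backward scan: walk the path right-to-left with rfind,
--     never materialising a parts list; the first non-empty token is the
--     filename, later 4-digit tokens are directory year candidates.  The
--     filename prefix test is done by direct slicing (filename[:4] digits and
--     the next char, if any, '-' or '_') instead of split()."""
--     if not year and not (start_year and end_year):
--         return True
--
--     s = relative_path.replace('\\', '/')
--     filename = None
--     candidate = None
--     i = len(s)
--     while i != -1:
--         j = s.rfind('/', 0, i)
--         token = s[j + 1:i]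
--         if token:
--             if filename is None:
--                 filename = token
--             elif len(token) == 4 and token.isdigit():
--                 candidate = int(token)
--                 break
--         i = j
--
--     if candidate is None:
--         if filename is None:
--             filename = relative_path
--         if (len(filename) >= 4 and filename[:4].isdigit()
--                 and (len(filename) == 4 or filename[4] in '-_')):
--             candidate = int(filename[:4])
--
--     if candidate is None:
--         return True
--
--     if year:
--         return candidate == year
--     return start_year <= candidate <= end_year
-- ===== Notes on version B (the rewrite author's own statement) =====
-- stated objective: alternative
-- what changed: A tokenizes the whole path with split into a parts list, loops over the reversed directory parts, then tests split-based dash/underscore filename prefixes; B never builds a parts list: it walks the raw string right-to-left with rfind-bounded index arithmetic, treating the first non-empty token as the filename and later 4-digit tokens as candidates, and tests the filename prefix by direct slicing (first four chars digits and the following char, if any, a dash or underscore) instead of split.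
import Mathlib
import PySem

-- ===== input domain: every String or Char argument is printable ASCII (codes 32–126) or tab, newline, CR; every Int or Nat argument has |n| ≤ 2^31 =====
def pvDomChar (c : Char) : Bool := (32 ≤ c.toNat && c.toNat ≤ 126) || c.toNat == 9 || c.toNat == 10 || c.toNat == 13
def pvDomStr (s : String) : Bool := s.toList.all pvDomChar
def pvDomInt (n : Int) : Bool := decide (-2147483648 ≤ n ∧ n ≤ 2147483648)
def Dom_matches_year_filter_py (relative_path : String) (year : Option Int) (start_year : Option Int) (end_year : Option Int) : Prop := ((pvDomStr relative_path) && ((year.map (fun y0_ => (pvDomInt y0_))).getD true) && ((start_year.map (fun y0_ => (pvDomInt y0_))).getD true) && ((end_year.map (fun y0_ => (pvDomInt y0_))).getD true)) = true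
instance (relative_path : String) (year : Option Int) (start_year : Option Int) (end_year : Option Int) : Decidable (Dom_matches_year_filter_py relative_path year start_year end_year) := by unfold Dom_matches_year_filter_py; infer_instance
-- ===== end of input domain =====

-- B replaces A's tokenize-then-scan (build a parts list with split, loop over reversed
-- directory parts, then a split-based dash/underscore filename-prefix if/else) by a single
-- backward index scan of the raw path with rfind (no parts list is ever built) and a direct
-- slicing test of the filename prefix; objective: alternative (same cost, different traversal).


-- ===== PORT A =====
-- A's `for part in reversed(parts[:-1]): if len(part)==4 and part.isdigit(): candidate=int(part); break`
def findYearLoop : List (List Char) → Option Int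
  | [] => none
  | p :: rest =>
    if PySem.Chars.len p == 4 && PySem.Chars.strIsdigit p
    then some ((PySem.Int.ofChars? p).getD 0)          -- int(part); isdigit guarantees a value
    else findYearLoop rest

def matches_year_filter_py (relative_path : String) (year : Option Int) (start_year : Option Int) (end_year : Option Int) : Bool :=
  -- `if not year and not (start_year and end_year): return True` (0 and None are falsy)
  if !(year.getD 0 != 0) && !((start_year.getD 0 != 0) && (end_year.getD 0 != 0)) then true
  else
    let parts := ((PySem.Chars.split? (PySem.Chars.replace relative_path.toList ['\\'] ['/']) ['/']).getD []).filter (fun p => !p.isEmpty)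
    let filename := match parts.getLast? with | some f => f | none => relative_path.toList
    let cand :=
      match findYearLoop ((PySem.List.slice parts none (some (-1))).reverse) with
      | some c => some c
      | none =>
        let p1 := ((PySem.Chars.split? filename ['-']).getD []).headD []   -- filename.split('-')[0]; split never yields []
        if PySem.Chars.len p1 == 4 && PySem.Chars.strIsdigit p1 then some ((PySem.Int.ofChars? p1).getD 0)
        else
          let p2 := ((PySem.Chars.split? filename ['_']).getD []).headD []   -- filename.split('_')[0]
          if PySem.Chars.len p2 == 4 && PySem.Chars.strIsdigit p2 then some ((PySem.Int.ofChars? p2).getD 0)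
          else none
    match cand with
    | none => true
    | some c =>
      if year.getD 0 != 0 then decide (c = year.getD 0)
      else decide (start_year.getD 0 ≤ c ∧ c ≤ end_year.getD 0)

-- ===== PORT B =====
-- B's `while i != -1:` backward scan of s with s.rfind('/', 0, i); the fuel argument only
-- makes the recursion total (s.length + 1 never runs out: i strictly decreases from s.length to -1);
-- returns (candidate, filename)
def bLoop (cs : List Char) : Nat → Int → Option (List Char) → Option Int × Option (List Char)
  | 0, _, filename => (none, filename)
  | fuel + 1, i, filename =>
    if i == -1 then (none, filename)
    else
      let j := PySem.Chars.rfindFrom cs ['/'] 0 (some i)     -- s.rfind('/', 0, i)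
      let token := PySem.List.slice cs (some (j + 1)) (some i)   -- s[j+1:i]
      if !token.isEmpty then
        match filename with
        | none => bLoop cs fuel j (some token)
        | some f =>
          if PySem.Chars.len token == 4 && PySem.Chars.strIsdigit token
          then (some ((PySem.Int.ofChars? token).getD 0), some f)   -- candidate = int(token); break
          else bLoop cs fuel j (some f)
      else bLoop cs fuel j filename

def matches_year_filter_py_alt (relative_path : String) (year : Option Int) (start_year : Option Int) (end_year : Option Int) : Bool :=
  if !(year.getD 0 != 0) && !((start_year.getD 0 != 0) && (end_year.getD 0 != 0)) then true
  else
    let s := PySem.Chars.replace relative_path.toList ['\\'] ['/']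
    let r := bLoop s (s.length + 1) (s.length : Int) none
    let cand :=
      match r.1 with
      | some c => some c
      | none =>
        let f := r.2.getD relative_path.toList                 -- if filename is None: filename = relative_path
        if decide (4 ≤ f.length) && PySem.Chars.strIsdigit (PySem.List.slice f none (some 4)) &&
             (f.length == 4 || (PySem.List.pyGet? f 4 == some '-' || PySem.List.pyGet? f 4 == some '_'))
        then some ((PySem.Int.ofChars? (PySem.List.slice f none (some 4))).getD 0)   -- int(filename[:4])
        else none
    match cand with
    | none => true
    | some c =>
      if year.getD 0 != 0 then decide (c = year.getD 0)
      else decide (start_year.getD 0 ≤ c ∧ c ≤ end_year.getD 0)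

-- ===== PRECONDITION & SPEC =====
def Spec_matches_year_filter_py (relative_path : String) (year : Option Int) (start_year : Option Int) (end_year : Option Int) (out : Bool) : Prop := out = matches_year_filter_py_alt relative_path year start_year end_year
instance (relative_path : String) (year : Option Int) (start_year : Option Int) (end_year : Option Int) (out : Bool) : Decidable (Spec_matches_year_filter_py relative_path year start_year end_year out) := by unfold Spec_matches_year_filter_py; infer_instance

-- ===== CLAIM (what is proved, stated in full; the proofs are below) =====
def Claim_equal_matches_year_filter_py : Prop := ∀ (relative_path : String) (year : Option Int) (start_year : Option Int) (end_year : Option Int), Dom_matches_year_filter_py relative_path year start_year end_year → Spec_matches_year_filter_py relative_path year start_year end_year (matches_year_filter_py relative_path year start_year end_year)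

-- ===== LEMMAS AND PROOFS =====

-- the year test both programs apply to a token, and the value they take from it
def isYearTok (t : List Char) : Bool := PySem.Chars.len t == 4 && PySem.Chars.strIsdigit t
def yearVal (t : List Char) : Int := (PySem.Int.ofChars? t).getD 0

-- reference form of B's loop: process the reversed token sequence
def revProcess : List (List Char) → Option (List Char) → Option Int × Option (List Char)
  | [], fn => (none, fn)
  | t :: ts, fn =>
    if !t.isEmpty then
      match fn with
      | none => revProcess ts (some t)
      | some f => if isYearTok t then (some (yearVal t), some f) else revProcess ts (some f)
    else revProcess ts fn

-- PySem's fuel-based splitOn on a one-character separator is Mathlib's List.splitOn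
theorem splitOn_go_spec (c : Char) (l cur : List Char) (acc : List (List Char)) (fuel : Nat)
    (h : l.length < fuel) :
    PySem.Chars.splitOn.go [c] fuel l cur acc
      = acc.reverse ++ (l.splitOn c).modifyHead (cur.reverse ++ ·) := by
  induction l generalizing cur acc fuel with
  | nil =>
    match fuel, h with
    | fuel + 1, _ =>
      simp [PySem.Chars.splitOn.go, List.splitOn, List.splitOnP_nil]
  | cons x rest ih =>
    match fuel, h with
    | fuel + 1, h =>
      rw [PySem.Chars.splitOn.go]
      by_cases hx : x = c
      · subst hx
        simp only [List.isPrefixOf, BEq.rfl, Bool.and_true, if_true]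
        have hdrop : List.drop [x].length (x :: rest) = rest := rfl
        rw [hdrop, ih _ _ _ (by simpa using Nat.lt_of_succ_lt_succ h)]
        simp only [List.splitOn, List.splitOnP_cons, BEq.rfl, if_true, List.reverse_cons]
        obtain ⟨hd, tl, hrw⟩ := List.exists_cons_of_ne_nil (List.splitOnP_ne_nil (fun x_1 => x_1 == x) rest)
        rw [hrw]
        simp [List.modifyHead]
      · have hpre : [c].isPrefixOf (x :: rest) = false := by
          simp [List.isPrefixOf]; exact fun hh => (hx hh.symm).elim
        rw [hpre]
        simp only [Bool.false_eq_true, if_false]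
        rw [ih _ _ _ (by simpa using Nat.lt_of_succ_lt_succ h)]
        have hne : (rest.splitOn c) ≠ [] := List.splitOnP_ne_nil _ _
        simp only [List.splitOn, List.splitOnP_cons]
        have hbeq : (x == c) = false := by simp [hx]
        rw [hbeq]
        simp only [Bool.false_eq_true, if_false]
        obtain ⟨hd, tl, hrw⟩ := List.exists_cons_of_ne_nil hne
        simp only [List.splitOn] at hrw
        rw [hrw]
        simp [List.modifyHead]

theorem chars_splitOn_eq (c : Char) (l : List Char) :
    PySem.Chars.splitOn l [c] = l.splitOn c := by
  rw [PySem.Chars.splitOn, splitOn_go_spec c l [] [] _ (Nat.lt_succ_self _)]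
  have hne : (l.splitOn c) ≠ [] := List.splitOnP_ne_nil _ _
  obtain ⟨hd, tl, hrw⟩ := List.exists_cons_of_ne_nil hne
  rw [hrw]; simp [List.modifyHead]

-- rfind of a one-character needle: -1 when absent, the last occurrence when present
theorem rfind_go_not_mem (c : Char) (s : List Char) (k : Nat) (h : c ∉ s) :
    PySem.Chars.rfind.go s [c] k = -1 := by
  induction k with
  | zero =>
    rw [PySem.Chars.rfind.go]
    have : [c].isPrefixOf s = false := by
      cases s with
      | nil => rfl
      | cons y ys =>
        simp [List.isPrefixOf]
        intro hy; exact h (hy ▸ List.mem_cons_self)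
    simp [this]
  | succ j ih =>
    rw [PySem.Chars.rfind.go]
    have : [c].isPrefixOf (s.drop (j+1)) = false := by
      cases hd : s.drop (j+1) with
      | nil => rfl
      | cons y ys =>
        simp [List.isPrefixOf]
        intro hy
        exact h (hy ▸ List.mem_of_mem_drop (hd ▸ List.mem_cons_self))
    simp [this, ih]

theorem rfind_not_mem (c : Char) (s : List Char) (h : c ∉ s) :
    PySem.Chars.rfind s [c] = -1 := by
  rw [PySem.Chars.rfind]; exact rfind_go_not_mem c s _ h

theorem rfind_go_last (c : Char) (a b : List Char) (k : Nat) (hb : c ∉ b) (hk : a.length ≤ k) :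
    PySem.Chars.rfind.go (a ++ c :: b) [c] k = (a.length : Int) := by
  induction k with
  | zero =>
    have ha : a = [] := List.eq_nil_of_length_eq_zero (Nat.le_zero.mp hk)
    subst ha
    rw [PySem.Chars.rfind.go]
    simp [List.isPrefixOf]
  | succ j ih =>
    rw [PySem.Chars.rfind.go]
    by_cases he : a.length = j + 1
    · have : (a ++ c :: b).drop (j+1) = c :: b := by
        rw [← he, List.drop_left]
      rw [this]
      simp [List.isPrefixOf, he]
    · have hlt : a.length ≤ j := by omega
      have hpre : [c].isPrefixOf ((a ++ c :: b).drop (j+1)) = false := by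
        have hdrop : (a ++ c :: b).drop (j+1) = b.drop (j + 1 - (a.length + 1)) := by
          have h1 : a ++ c :: b = (a ++ [c]) ++ b := by simp
          rw [h1, List.drop_append]
          have h2 : (a ++ [c]).drop (j+1) = [] :=
            List.drop_eq_nil_of_le (by simp; omega)
          rw [h2]
          simp
        rw [hdrop]
        cases hd : b.drop (j + 1 - (a.length + 1)) with
        | nil => rfl
        | cons y ys =>
          simp [List.isPrefixOf]
          intro hy
          exact hb (hy ▸ List.mem_of_mem_drop (hd ▸ List.mem_cons_self))
      simp [hpre, ih hlt]

theorem rfind_last (c : Char) (a b : List Char) (hb : c ∉ b) :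
    PySem.Chars.rfind (a ++ c :: b) [c] = (a.length : Int) := by
  rw [PySem.Chars.rfind]
  exact rfind_go_last c a b _ hb (by simp)

-- s.rfind('/', 0, i) with 0 ≤ i ≤ len(s) searches the prefix s[:i]
theorem rfindFrom_eq_rfind_take (cs : List Char) (c : Char) (i : Nat) (h : i ≤ cs.length) :
    PySem.Chars.rfindFrom cs [c] 0 (some (i : Int)) = PySem.Chars.rfind (cs.take i) [c] := by
  have hni : ¬ ((cs.length : Int) < (i : Int)) := by exact_mod_cast not_lt.mpr h
  simp only [PySem.Chars.rfindFrom, if_neg hni, if_neg (not_lt.mpr (Int.natCast_nonneg i)),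
    if_neg (lt_irrefl (0 : Int)), Int.toNat_natCast, zero_add]
  have h0 : List.drop (Int.toNat 0) (List.take i cs) = List.take i cs := by simp
  rw [h0]
  split_ifs with h1
  · omega
  · rfl

-- every list splits at its last occurrence of c, or has none
theorem last_occ_decomp (c : Char) (p : List Char) :
    c ∉ p ∨ ∃ a b, p = a ++ c :: b ∧ c ∉ b := by
  induction p using List.reverseRecOn with
  | nil => left; simp
  | append_singleton p' x ih =>
    by_cases hx : x = c
    · subst hx
      right; exact ⟨p', [], by simp, by simp⟩
    · rcases ih with h | ⟨a, b, rfl, hb⟩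
      · left; simp; exact ⟨h, fun hc => hx hc.symm⟩
      · right
        exact ⟨a, b ++ [x], by simp, by simp; exact ⟨hb, fun hc => hx hc.symm⟩⟩

theorem splitOn_eq_single (c : Char) (b : List Char) (hb : c ∉ b) :
    b.splitOn c = [b] := by
  induction b with
  | nil => rfl
  | cons x xs ih =>
    have hx : (x == c) = false := by
      simp; rintro rfl; exact hb List.mem_cons_self
    have hxs : c ∉ xs := fun h => hb (List.mem_cons_of_mem _ h)
    simp only [List.splitOn, List.splitOnP_cons, hx, Bool.false_eq_true, if_false]
    rw [show List.splitOnP (fun x => x == c) xs = xs.splitOn c from rfl, ih hxs]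
    rfl

-- splitting at the last separator appends one token
theorem splitOn_append_last (c : Char) (a b : List Char) (hb : c ∉ b) :
    (a ++ c :: b).splitOn c = a.splitOn c ++ [b] := by
  induction a with
  | nil =>
    simp only [List.nil_append, List.splitOn, List.splitOnP_cons, BEq.rfl, if_true]
    rw [show List.splitOnP (fun x => x == c) b = b.splitOn c from rfl, splitOn_eq_single c b hb]
    rfl
  | cons x xs ih =>
    simp only [List.cons_append, List.splitOn, List.splitOnP_cons]
    by_cases hx : (x == c) = true
    · rw [if_pos hx, if_pos hx]
      simp only [List.splitOn] at ih
      rw [ih]; rfl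
    · rw [if_neg hx, if_neg hx]
      simp only [List.splitOn] at ih
      rw [ih]
      obtain ⟨hd, tl, hrw⟩ := List.exists_cons_of_ne_nil (List.splitOnP_ne_nil (fun x => x == c) xs)
      rw [hrw]
      rfl

-- head of a split is the longest separator-free prefix
theorem head_splitOn (c : Char) (l : List Char) :
    (l.splitOn c).headD [] = l.takeWhile (fun x => !(x == c)) := by
  induction l with
  | nil => rfl
  | cons x xs ih =>
    simp only [List.splitOn, List.splitOnP_cons, List.takeWhile_cons]
    by_cases hx : (x == c) = true
    · rw [if_pos hx]; simp [hx]
    · rw [if_neg hx]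
      simp only [hx, Bool.not_false, if_pos]
      obtain ⟨hd, tl, hrw⟩ := List.exists_cons_of_ne_nil (List.splitOnP_ne_nil (fun x => x == c) xs)
      rw [hrw]
      simp only [List.modifyHead, List.headD_cons]
      simp only [List.splitOn] at ih
      rw [hrw] at ih
      simp only [List.headD_cons] at ih
      rw [ih]

-- length-4 all-digit takeWhile prefix, characterised by direct indexing
theorem tw_spec (c : Char) (hc : PySem.Chars.isdigit c = false) (n : Nat) (f : List Char) :
    ((f.takeWhile (fun x => !(x == c))).length = n
        ∧ (f.takeWhile (fun x => !(x == c))).all PySem.Chars.isdigit = true)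
      ↔ (n ≤ f.length ∧ (f.take n).all PySem.Chars.isdigit = true
          ∧ (f.length = n ∨ f[n]? = some c)) := by
  induction f generalizing n with
  | nil =>
    simp only [List.takeWhile_nil, List.length_nil, List.all_nil, List.take_nil,
      List.getElem?_nil]
    constructor
    · rintro ⟨h, -⟩; exact ⟨by omega, trivial, Or.inl (by omega)⟩
    · rintro ⟨h1, -, h2⟩
      refine ⟨?_, trivial⟩
      rcases h2 with h2 | h2
      · omega
      · exact absurd h2 (by simp)
  | cons x xs ih =>
    by_cases hx : (x == c) = true
    · have hxc : x = c := by simpa using hx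
      subst hxc
      simp only [List.takeWhile_cons, hx, Bool.not_true, Bool.false_eq_true, if_false]
      cases n with
      | zero => simp
      | succ m =>
        constructor
        · rintro ⟨h, -⟩; simp at h
        · rintro ⟨-, hall, -⟩
          rw [List.take_succ_cons, List.all_cons, hc] at hall
          simp at hall
    · have hpx : (!(x == c)) = true := by simp [hx]
      simp only [List.takeWhile_cons, hpx, if_true]
      cases n with
      | zero =>
        constructor
        · rintro ⟨h, -⟩; simp at h
        · rintro ⟨-, -, h⟩
          rcases h with h | h
          · simp at h
          · simp at h; exact absurd h (by simpa using hx)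
      | succ m =>
        simp only [List.length_cons, List.all_cons, List.take_succ_cons, List.getElem?_cons_succ,
          Nat.succ_le_succ_iff, Nat.succ_inj, Bool.and_eq_true]
        constructor
        · rintro ⟨h1, hd, hall⟩
          have := (ih m).mp ⟨h1, hall⟩
          exact ⟨this.1, ⟨hd, this.2.1⟩, this.2.2⟩
        · rintro ⟨h1, ⟨hd, hall⟩, h2⟩
          have := (ih m).mpr ⟨h1, hall, h2⟩
          exact ⟨this.1, hd, this.2⟩

-- A's split-based 4-digit-prefix test in B's slicing form (c is '-' or '_', not a digit)
theorem prefix_test_eq (c : Char) (hc : PySem.Chars.isdigit c = false) (f : List Char) :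
    (isYearTok ((f.splitOn c).headD [])
      = (decide (4 ≤ f.length) && PySem.Chars.strIsdigit (f.take 4)
          && (f.length == 4 || f[4]? == some c)))
    ∧ (isYearTok ((f.splitOn c).headD []) = true → (f.splitOn c).headD [] = f.take 4) := by
  have hL := head_splitOn c f
  have key := tw_spec c hc 4 f
  have hiso : ∀ (t : List Char), isYearTok t = true ↔ (t.length = 4 ∧ t.all PySem.Chars.isdigit = true) := by
    intro t
    simp only [isYearTok, PySem.Chars.strIsdigit, Bool.and_eq_true, beq_iff_eq]
    constructor
    · rintro ⟨h1, -, h2⟩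
      refine ⟨?_, h2⟩
      have : PySem.Chars.len t = (t.length : Int) := by simp [PySem.Chars.len]
      rw [this] at h1; exact_mod_cast h1
    · rintro ⟨h1, h2⟩
      refine ⟨?_, ?_, h2⟩
      · simp [PySem.Chars.len, h1]
      · simp; intro he; rw [he] at h1; simp at h1
  constructor
  · rw [hL, Bool.eq_iff_iff]
    rw [hiso]
    simp only [Bool.and_eq_true, Bool.or_eq_true, beq_iff_eq, decide_eq_true_eq,
      PySem.Chars.strIsdigit, Bool.not_eq_true']
    constructor
    · intro h
      obtain ⟨ha, hb, hcc⟩ := key.mp h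
      refine ⟨⟨ha, ?_, hb⟩, hcc⟩
      simp only [List.isEmpty_eq_false_iff, ne_eq]
      intro he
      have hlen := congrArg List.length he
      rw [List.length_take, List.length_nil] at hlen
      omega
    · rintro ⟨⟨h1, -, h2⟩, h3⟩
      exact key.mpr ⟨h1, h2, h3⟩
  · intro h
    rw [hL] at h ⊢
    have h4 := ((hiso _).mp h).1
    have := List.prefix_iff_eq_take.mp (List.takeWhile_prefix (l := f) (fun x => !(x == c)))
    rw [h4] at this
    exact this

theorem bLoop_neg_one (cs : List Char) (fuel : Nat) (fn : Option (List Char)) :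
    bLoop cs fuel (-1) fn = (none, fn) := by
  cases fuel with
  | zero => rfl
  | succ f => rw [bLoop]; simp

-- the backward index loop processes the reversed token list of the scanned prefix
theorem bLoop_eq_revProcess (cs : List Char) (i : Nat) (fuel : Nat) (fn : Option (List Char))
    (hf : i < fuel) (hi : i ≤ cs.length) :
    bLoop cs fuel (i : Int) fn = revProcess ((cs.take i).splitOn '/').reverse fn := by
  induction i using Nat.strong_induction_on generalizing fuel fn with
  | _ i ih =>
    match fuel, hf with
    | fuel + 1, hf =>
      rw [bLoop]
      have hne : ((i : Int) == -1) = false := by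
        simp only [beq_eq_false_iff_ne, ne_eq]
        omega
      rw [hne]
      simp only [Bool.false_eq_true, if_false]
      rw [rfindFrom_eq_rfind_take cs '/' i hi]
      rcases last_occ_decomp '/' (cs.take i) with hno | ⟨a, b, hdec, hb⟩
      · -- no slash in the scanned prefix: single token, then the loop ends
        rw [rfind_not_mem '/' _ hno]
        have htok : PySem.List.slice cs (some (-1 + 1)) (some (i : Int)) = cs.take i := by
          have h0 : (-1 + 1 : Int) = 0 := by norm_num
          rw [h0, PySem.List.slice_zero_start, PySem.List.slice_to_natCast]
        rw [htok]
        rw [splitOn_eq_single '/' _ hno]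
        simp only [List.reverse_cons, List.reverse_nil, List.nil_append, revProcess]
        by_cases he : (cs.take i).isEmpty
        · simp only [he, Bool.not_true, Bool.false_eq_true, if_false, bLoop_neg_one]
        · simp only [he, Bool.not_false, if_true]
          cases fn with
          | none => rw [bLoop_neg_one]
          | some f =>
            dsimp only
            by_cases hy : (PySem.Chars.len (cs.take i) == 4 && PySem.Chars.strIsdigit (cs.take i)) = true
            · rw [if_pos hy, if_pos (by exact hy)]
              rfl
            · rw [if_neg hy, if_neg (by exact hy), bLoop_neg_one]
      · -- the prefix splits at its last slash: one token, then recurse on the rest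
        rw [hdec, rfind_last '/' a b hb]
        have hlen : i = a.length + 1 + b.length := by
          have := congrArg List.length hdec
          simp [List.length_take, min_eq_left hi] at this
          omega
        have htok : PySem.List.slice cs (some ((a.length : Int) + 1)) (some (i : Int)) = b := by
          have h1 : ((a.length : Int) + 1) = ((a.length + 1 : Nat) : Int) := by push_cast; ring
          rw [h1, PySem.List.slice_natCast]
          have h2 : b = (cs.take i).drop (a.length + 1) := by
            rw [hdec]
            rw [List.drop_append]
            simp
          rw [h2, List.drop_take]
        rw [htok]
        have hsplit : ((cs.take i).splitOn '/') = a.splitOn '/' ++ [b] := by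
          rw [hdec]; exact splitOn_append_last '/' a b hb
        rw [hdec] at hsplit
        rw [hsplit]
        simp only [List.reverse_append, List.reverse_cons, List.reverse_nil, List.nil_append,
          List.cons_append, revProcess]
        have ha : a = cs.take a.length := by
          have h3 : a.length ≤ i := by omega
          have h4 : (cs.take i).take a.length = a := by
            rw [hdec]; simp
          rw [List.take_take, min_eq_left h3] at h4
          exact h4.symm
        have hrec : ∀ fn', bLoop cs fuel ((a.length : Nat) : Int) fn'
            = revProcess ((cs.take a.length).splitOn '/').reverse fn' := by
          intro fn'
          exact ih a.length (by omega) fuel fn' (by omega) (by omega)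
        rw [← ha] at hrec
        by_cases he : b.isEmpty
        · simp only [he, Bool.not_true, Bool.false_eq_true, if_false]
          rw [hrec, ha]
        · simp only [he, Bool.not_false, if_true]
          cases fn with
          | none => rw [hrec, ha]
          | some f =>
            dsimp only
            by_cases hy : (PySem.Chars.len b == 4 && PySem.Chars.strIsdigit b) = true
            · rw [if_pos hy, if_pos (by exact hy)]
              rfl
            · rw [if_neg hy, if_neg (by exact hy), hrec, ha]

-- A's break-loop is find-first
theorem findYearLoop_eq_find? (l : List (List Char)) :
    findYearLoop l = (l.find? isYearTok).map yearVal := by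
  induction l with
  | nil => rfl
  | cons p rest ih =>
    rw [findYearLoop, List.find?_cons]
    by_cases h : (PySem.Chars.len p == 4 && PySem.Chars.strIsdigit p) = true
    · rw [if_pos h, show isYearTok p = true from h]; rfl
    · have hy : isYearTok p = false := by
        unfold isYearTok; simpa using h
      rw [if_neg h, hy, ih]

-- revProcess: the first nonempty token is the filename, the rest feed a find-first
theorem revProcess_some (ts : List (List Char)) (f : List Char) :
    revProcess ts (some f)
      = (((ts.filter (fun t => !t.isEmpty)).find? isYearTok).map yearVal, some f) := by
  induction ts with
  | nil => rfl
  | cons t rest ih =>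
    rw [revProcess]
    by_cases he : (!t.isEmpty) = true
    · rw [if_pos he]
      simp only [List.filter_cons, he, if_true, List.find?_cons]
      by_cases hy : isYearTok t = true
      · rw [if_pos hy, hy]; rfl
      · have hy' : isYearTok t = false := by simpa using hy
        rw [if_neg hy, ih, hy']
    · have he' : (!t.isEmpty) = false := by simpa using he
      rw [if_neg he, ih]
      simp only [List.filter_cons, he', Bool.false_eq_true, if_false]

theorem revProcess_none (ts : List (List Char)) :
    revProcess ts none
      = (match ts.filter (fun t => !t.isEmpty) with
        | [] => ((none : Option Int), (none : Option (List Char)))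
        | f :: rest => ((rest.find? isYearTok).map yearVal, some f)) := by
  induction ts with
  | nil => rfl
  | cons t rest ih =>
    rw [revProcess]
    by_cases he : (!t.isEmpty) = true
    · rw [if_pos he]
      simp only [List.filter_cons, he, if_true]
      rw [revProcess_some]
    · have he' : (!t.isEmpty) = false := by simpa using he
      rw [if_neg he, ih]
      simp only [List.filter_cons, he', Bool.false_eq_true, if_false]

-- A's nested '-'/'_' filename branch equals B's merged slicing condition
theorem filename_case_eq (f : List Char) :
    (let p1 := ((PySem.Chars.split? f ['-']).getD []).headD []
     if PySem.Chars.len p1 == 4 && PySem.Chars.strIsdigit p1 then some ((PySem.Int.ofChars? p1).getD 0)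
     else
       let p2 := ((PySem.Chars.split? f ['_']).getD []).headD []
       if PySem.Chars.len p2 == 4 && PySem.Chars.strIsdigit p2 then some ((PySem.Int.ofChars? p2).getD 0)
       else none)
    = (if decide (4 ≤ f.length) && PySem.Chars.strIsdigit (PySem.List.slice f none (some 4)) &&
            (f.length == 4 || (PySem.List.pyGet? f 4 == some '-' || PySem.List.pyGet? f 4 == some '_'))
       then some ((PySem.Int.ofChars? (PySem.List.slice f none (some 4))).getD 0)
       else none) := by
  have hslice : PySem.List.slice f none (some 4) = f.take 4 := by
    rw [show (4 : Int) = ((4 : Nat) : Int) from rfl, PySem.List.slice_to_natCast]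
  have hget : PySem.List.pyGet? f 4 = f[4]? := by
    simp only [PySem.List.pyGet?, PySem.List.pyIdx?]
    by_cases h : 4 < f.length
    · simp [h]
    · simp [h]
  have hs1 : (PySem.Chars.split? f ['-']).getD [] = f.splitOn '-' := by
    rw [PySem.Chars.split?]
    simp [chars_splitOn_eq]
  have hs2 : (PySem.Chars.split? f ['_']).getD [] = f.splitOn '_' := by
    rw [PySem.Chars.split?]
    simp [chars_splitOn_eq]
  obtain ⟨hc1, hv1⟩ := prefix_test_eq '-' (by decide) f
  obtain ⟨hc2, hv2⟩ := prefix_test_eq '_' (by decide) f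
  rw [hslice, hget, hs1, hs2]
  show (if isYearTok ((f.splitOn '-').headD []) then _ else
          if isYearTok ((f.splitOn '_').headD []) then _ else none) = _
  have hmerge : (decide (4 ≤ f.length) && PySem.Chars.strIsdigit (f.take 4) &&
        (f.length == 4 || (f[4]? == some '-' || f[4]? == some '_')))
      = (isYearTok ((f.splitOn '-').headD []) || isYearTok ((f.splitOn '_').headD [])) := by
    rw [hc1, hc2]
    cases decide (4 ≤ f.length) <;> cases PySem.Chars.strIsdigit (f.take 4) <;>
      cases (f.length == 4) <;> cases (f[4]? == some '-') <;> cases (f[4]? == some '_') <;> rfl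
  rw [hmerge]
  by_cases h1 : isYearTok ((f.splitOn '-').headD []) = true
  · rw [if_pos h1, if_pos (by rw [h1]; simp), hv1 h1]
  · have h1' : isYearTok ((f.splitOn '-').headD []) = false := by simpa using h1
    rw [if_neg h1]
    by_cases h2 : isYearTok ((f.splitOn '_').headD []) = true
    · rw [if_pos h2, if_pos (by rw [h1', h2]; rfl), hv2 h2]
    · have h2' : isYearTok ((f.splitOn '_').headD []) = false := by simpa using h2
      rw [if_neg h2, if_neg (by rw [h1', h2']; simp)]

-- ===== VERDICT (by name: the statement is the Claim_ definition above) =====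
theorem matches_year_filter_py_spec : Claim_equal_matches_year_filter_py := by
  intro rp year sy ey _
  unfold Spec_matches_year_filter_py matches_year_filter_py matches_year_filter_py_alt
  by_cases hg : (!(year.getD 0 != 0) && !((sy.getD 0 != 0) && (ey.getD 0 != 0))) = true
  · rw [if_pos hg, if_pos hg]
  · rw [if_neg hg, if_neg hg]
    have hsp : ∀ cs : List Char, (PySem.Chars.split? cs ['/']).getD [] = cs.splitOn '/' := by
      intro cs
      rw [PySem.Chars.split?]
      simp [chars_splitOn_eq]
    generalize PySem.Chars.replace rp.toList ['\\'] ['/'] = cs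
    have hloop : bLoop cs (cs.length + 1) (cs.length : Int) none
        = revProcess ((cs.splitOn '/').reverse) none := by
      rw [bLoop_eq_revProcess cs cs.length (cs.length + 1) none (Nat.lt_succ_self _) (le_refl _),
        List.take_length]
    dsimp only
    rw [hloop, revProcess_none, List.filter_reverse, hsp]
    generalize List.filter (fun p => !p.isEmpty) (List.splitOn '/' cs) = parts
    rw [PySem.List.slice_to_neg_one, findYearLoop_eq_find?, ← List.tail_reverse]
    cases hp : parts.reverse with
    | nil =>
      have hparts : parts.getLast? = none := by
        rw [← List.head?_reverse, hp]; rfl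
      rw [hparts]
      dsimp only
      have hf := filename_case_eq rp.toList
      dsimp only at hf
      rw [hf]
      rfl
    | cons f rest =>
      have hlast : parts.getLast? = some f := by
        rw [← List.head?_reverse, hp]; rfl
      rw [hlast]
      simp only [List.tail_cons, Option.getD_some]
      cases hfind : (rest.find? isYearTok) with
      | some c => rfl
      | none =>
        have hf := filename_case_eq f
        dsimp only at hf
        rw [hf]
        rfl
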